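-- pv_equiv track=rewrite | github.com/shardulchavan/CapMatch-TakeHome | poc-capmatch/api_clients/census_client.py | _calculate_income_distribution
-- ===== SOURCE A (Python) =====
-- from typing import Dict, List, Any, Optional, Tuple
--
-- def _calculate_income_distribution(radius_data: Dict[str, Any]) -> Dict[str, Any]:
--     """Calculate income distribution across all radii"""
--     distribution = {
--         "brackets": {
--             "under_50k": 0,
--             "50k_100k": 0,
--             "100k_150k": 0,
--             "150k_plus": 0
--         }
--     }
--
--     # Aggregate across all radii (simple average for POC)
--     for radius_key, data in radius_data.items():
--         if isinstance(data, dict):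
--             # Under 50k
--             distribution["brackets"]["under_50k"] += sum([
--                 data.get("income_less_10k", 0),
--                 data.get("income_10k_15k", 0),
--                 data.get("income_15k_20k", 0),
--                 data.get("income_20k_25k", 0),
--                 data.get("income_25k_30k", 0),
--                 data.get("income_30k_35k", 0),
--                 data.get("income_35k_40k", 0),
--                 data.get("income_40k_45k", 0),
--                 data.get("income_45k_50k", 0)
--             ])
--
--             # 50k-100k
--             distribution["brackets"]["50k_100k"] += sum([
--                 data.get("income_50k_60k", 0),
--                 data.get("income_60k_75k", 0),
--                 data.get("income_75k_100k", 0)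
--             ])
--
--             # 100k-150k
--             distribution["brackets"]["100k_150k"] += sum([
--                 data.get("income_100k_125k", 0),
--                 data.get("income_125k_150k", 0)
--             ])
--
--             # 150k+
--             distribution["brackets"]["150k_plus"] += sum([
--                 data.get("income_150k_200k", 0),
--                 data.get("income_200k_plus", 0)
--             ])
--
--     return distribution
-- ===== SOURCE B (Python) =====
-- _KEY_TO_BRACKET = {
--     "income_less_10k": "under_50k", "income_10k_15k": "under_50k",
--     "income_15k_20k": "under_50k", "income_20k_25k": "under_50k",
--     "income_25k_30k": "under_50k", "income_30k_35k": "under_50k",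
--     "income_35k_40k": "under_50k", "income_40k_45k": "under_50k",
--     "income_45k_50k": "under_50k",
--     "income_50k_60k": "50k_100k", "income_60k_75k": "50k_100k",
--     "income_75k_100k": "50k_100k",
--     "income_100k_125k": "100k_150k", "income_125k_150k": "100k_150k",
--     "income_150k_200k": "150k_plus", "income_200k_plus": "150k_plus",
-- }
--
-- def _calculate_income_distribution(radius_data):
--     """Inverted index: scan each radius's present fields once and classify
--     each field into its bracket, instead of 16 fixed lookups per radius."""
--     totals = {"under_50k": 0, "50k_100k": 0, "100k_150k": 0, "150k_plus": 0}
--     for data in radius_data.values():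
--         if isinstance(data, dict):
--             for field, value in data.items():
--                 bracket = _KEY_TO_BRACKET.get(field)
--                 if bracket is not None:
--                     totals[bracket] += value
--     return {"brackets": totals}
-- ===== Notes on version B (the rewrite author's own statement) =====
-- stated objective: alternative
-- what changed: Replaces A's four hand-listed bracket sums of 16 fixed data.get lookups per radius by an inverted key-to-bracket index: B scans each radius's actually-present fields once and classifies each field's value into its bracket via the index. Pre_ excludes association lists whose inner field lists repeat a key, an artifact of the list encoding that a Python dict cannot represent (there A's first-match lookup vs B's every-occurrence scan would both be defensible).
import Mathlib
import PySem

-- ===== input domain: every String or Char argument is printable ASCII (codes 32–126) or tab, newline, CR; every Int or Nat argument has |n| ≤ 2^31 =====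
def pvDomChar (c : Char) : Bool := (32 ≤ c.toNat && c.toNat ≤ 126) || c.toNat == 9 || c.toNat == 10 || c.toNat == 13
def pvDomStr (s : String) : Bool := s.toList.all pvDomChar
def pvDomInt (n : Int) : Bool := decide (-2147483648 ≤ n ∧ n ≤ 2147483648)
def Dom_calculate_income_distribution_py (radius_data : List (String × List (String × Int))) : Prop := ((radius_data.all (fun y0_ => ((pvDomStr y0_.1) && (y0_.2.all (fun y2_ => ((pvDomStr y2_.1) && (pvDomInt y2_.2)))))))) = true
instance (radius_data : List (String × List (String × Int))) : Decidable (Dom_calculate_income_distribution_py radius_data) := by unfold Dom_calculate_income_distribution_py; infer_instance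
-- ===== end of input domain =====

-- B replaces A's per-radius fixed 16 get-lookups by a single scan of each radius's
-- present fields classified through an inverted key-to-bracket index (alternative decomposition).

-- ===== PORT A =====
-- A folds over the radii, mutating a nested dict of bracket totals (four hand-listed sums).
def pvStepA (dist : PySem.Dict String (PySem.Dict String Int))
    (p : String × List (String × Int)) : PySem.Dict String (PySem.Dict String Int) :=
  let data := PySem.Dict.mk p.2
  let dist := dist.modify "brackets" PySem.Dict.empty (fun b =>
    b.modify "under_50k" 0 (· + ([PySem.Dict.getD data "income_less_10k" 0,
      PySem.Dict.getD data "income_10k_15k" 0, PySem.Dict.getD data "income_15k_20k" 0,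
      PySem.Dict.getD data "income_20k_25k" 0, PySem.Dict.getD data "income_25k_30k" 0,
      PySem.Dict.getD data "income_30k_35k" 0, PySem.Dict.getD data "income_35k_40k" 0,
      PySem.Dict.getD data "income_40k_45k" 0, PySem.Dict.getD data "income_45k_50k" 0]).sum))
  let dist := dist.modify "brackets" PySem.Dict.empty (fun b =>
    b.modify "50k_100k" 0 (· + ([PySem.Dict.getD data "income_50k_60k" 0,
      PySem.Dict.getD data "income_60k_75k" 0, PySem.Dict.getD data "income_75k_100k" 0]).sum))
  let dist := dist.modify "brackets" PySem.Dict.empty (fun b =>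
    b.modify "100k_150k" 0 (· + ([PySem.Dict.getD data "income_100k_125k" 0,
      PySem.Dict.getD data "income_125k_150k" 0]).sum))
  dist.modify "brackets" PySem.Dict.empty (fun b =>
    b.modify "150k_plus" 0 (· + ([PySem.Dict.getD data "income_150k_200k" 0,
      PySem.Dict.getD data "income_200k_plus" 0]).sum))

def calculate_income_distribution_py (radius_data : List (String × List (String × Int))) : List (String × List (String × Int)) :=
  let distribution : PySem.Dict String (PySem.Dict String Int) :=
    PySem.Dict.mk [("brackets", PySem.Dict.mk
      [("under_50k", 0), ("50k_100k", 0), ("100k_150k", 0), ("150k_plus", 0)])]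
  -- (in the typed port every value IS a dict, so the isinstance guard is always taken)
  let distribution := radius_data.foldl pvStepA distribution
  distribution.items.map (fun q => (q.1, q.2.items))

-- ===== PORT B =====
-- B: inverted index field-key -> bracket name; one scan over each radius's present fields.
def pvKeyToBracket : PySem.Dict String String := PySem.Dict.mk
  [("income_less_10k", "under_50k"), ("income_10k_15k", "under_50k"),
   ("income_15k_20k", "under_50k"), ("income_20k_25k", "under_50k"),
   ("income_25k_30k", "under_50k"), ("income_30k_35k", "under_50k"),
   ("income_35k_40k", "under_50k"), ("income_40k_45k", "under_50k"),
   ("income_45k_50k", "under_50k"),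
   ("income_50k_60k", "50k_100k"), ("income_60k_75k", "50k_100k"),
   ("income_75k_100k", "50k_100k"),
   ("income_100k_125k", "100k_150k"), ("income_125k_150k", "100k_150k"),
   ("income_150k_200k", "150k_plus"), ("income_200k_plus", "150k_plus")]

def pvStepB (t : PySem.Dict String Int) (p : String × Int) : PySem.Dict String Int :=
  match PySem.Dict.get? pvKeyToBracket p.1 with
  | some br => t.modify br 0 (· + p.2)   -- totals[bracket] += value (bracket always present)
  | none => t

def calculate_income_distribution_py_alt (radius_data : List (String × List (String × Int))) : List (String × List (String × Int)) :=
  let totals : PySem.Dict String Int := PySem.Dict.mk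
    [("under_50k", 0), ("50k_100k", 0), ("100k_150k", 0), ("150k_plus", 0)]
  -- (every value IS a dict in the typed port, so the isinstance guard is always taken)
  let totals := radius_data.foldl (fun t p => p.2.foldl pvStepB t) totals
  [("brackets", totals.items)]

-- ===== PRECONDITION & SPEC =====
-- Pre_ excludes inner association lists that repeat a field key: a Python dict cannot hold
-- duplicate keys, so on such encoding-only inputs A's first-match lookup and B's
-- every-occurrence scan are both defensible and neither is specified.
def Pre_calculate_income_distribution_py (radius_data : List (String × List (String × Int))) : Prop :=
  ∀ p ∈ radius_data, (p.2.map Prod.fst).Nodup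
instance (radius_data : List (String × List (String × Int))) : Decidable (Pre_calculate_income_distribution_py radius_data) := by unfold Pre_calculate_income_distribution_py; infer_instance

def pvWitness_calculate_income_distribution_py : (List (String × List (String × Int))) :=
  [("1mi", [("income_less_10k", 5), ("income_75k_100k", 2)]), ("3mi", [("income_200k_plus", 7)])]

def Spec_calculate_income_distribution_py (radius_data : List (String × List (String × Int))) (out : List (String × List (String × Int))) : Prop := out = calculate_income_distribution_py_alt radius_data
instance (radius_data : List (String × List (String × Int))) (out : List (String × List (String × Int))) : Decidable (Spec_calculate_income_distribution_py radius_data out) := by unfold Spec_calculate_income_distribution_py; infer_instance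

-- ===== CLAIM (what is proved, stated in full; the proofs are below) =====
def Claim_equal_calculate_income_distribution_py : Prop := ∀ (radius_data : List (String × List (String × Int))), Dom_calculate_income_distribution_py radius_data → Pre_calculate_income_distribution_py radius_data → Spec_calculate_income_distribution_py radius_data (calculate_income_distribution_py radius_data)

-- ===== LEMMAS AND PROOFS =====

def pvKeysU : List String :=
  ["income_less_10k", "income_10k_15k", "income_15k_20k", "income_20k_25k", "income_25k_30k",
   "income_30k_35k", "income_35k_40k", "income_40k_45k", "income_45k_50k"]
def pvKeys50 : List String := ["income_50k_60k", "income_60k_75k", "income_75k_100k"]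
def pvKeys100 : List String := ["income_100k_125k", "income_125k_150k"]
def pvKeys150 : List String := ["income_150k_200k", "income_200k_plus"]

-- the A-side per-entry bracket sum (what A adds for one radius and one bracket)
def pvSum (ks : List String) (d : List (String × Int)) : Int :=
  (ks.map (fun k => PySem.Dict.getD (PySem.Dict.mk d) k 0)).sum

-- the B-side per-entry indicator sum
def pvInd (ks : List String) (d : List (String × Int)) : Int :=
  (d.map (fun p => if p.1 ∈ ks then p.2 else 0)).sum

def pvMkDist (a b c d : Int) : PySem.Dict String (PySem.Dict String Int) :=
  PySem.Dict.mk [("brackets", PySem.Dict.mk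
    [("under_50k", a), ("50k_100k", b), ("100k_150k", c), ("150k_plus", d)])]

def pvMkTot (a b c d : Int) : PySem.Dict String Int :=
  PySem.Dict.mk [("under_50k", a), ("50k_100k", b), ("100k_150k", c), ("150k_plus", d)]

lemma pvStepA_mkDist (a b c d : Int) (p : String × List (String × Int)) :
    pvStepA (pvMkDist a b c d) p =
      pvMkDist (a + pvSum pvKeysU p.2) (b + pvSum pvKeys50 p.2)
               (c + pvSum pvKeys100 p.2) (d + pvSum pvKeys150 p.2) := by
  rfl

lemma pvFoldA (l : List (String × List (String × Int))) (a b c d : Int) :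
    l.foldl pvStepA (pvMkDist a b c d) =
      pvMkDist (a + (l.map (fun p => pvSum pvKeysU p.2)).sum)
               (b + (l.map (fun p => pvSum pvKeys50 p.2)).sum)
               (c + (l.map (fun p => pvSum pvKeys100 p.2)).sum)
               (d + (l.map (fun p => pvSum pvKeys150 p.2)).sum) := by
  induction l generalizing a b c d with
  | nil => simp
  | cons x xs ih =>
      simp only [List.foldl_cons, List.map_cons, List.sum_cons, pvStepA_mkDist, ih]
      ring_nf

-- the inverted index answers exactly by group membership (order of groups matches the index)
lemma pvLookup (k : String) :
    PySem.Dict.get? pvKeyToBracket k =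
      if k ∈ pvKeysU then some "under_50k"
      else if k ∈ pvKeys50 then some "50k_100k"
      else if k ∈ pvKeys100 then some "100k_150k"
      else if k ∈ pvKeys150 then some "150k_plus"
      else none := by
  by_cases h1 : k = "income_less_10k"
  · subst h1; decide
  by_cases h2 : k = "income_10k_15k"
  · subst h2; decide
  by_cases h3 : k = "income_15k_20k"
  · subst h3; decide
  by_cases h4 : k = "income_20k_25k"
  · subst h4; decide
  by_cases h5 : k = "income_25k_30k"
  · subst h5; decide
  by_cases h6 : k = "income_30k_35k"
  · subst h6; decide
  by_cases h7 : k = "income_35k_40k"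
  · subst h7; decide
  by_cases h8 : k = "income_40k_45k"
  · subst h8; decide
  by_cases h9 : k = "income_45k_50k"
  · subst h9; decide
  by_cases h10 : k = "income_50k_60k"
  · subst h10; decide
  by_cases h11 : k = "income_60k_75k"
  · subst h11; decide
  by_cases h12 : k = "income_75k_100k"
  · subst h12; decide
  by_cases h13 : k = "income_100k_125k"
  · subst h13; decide
  by_cases h14 : k = "income_125k_150k"
  · subst h14; decide
  by_cases h15 : k = "income_150k_200k"
  · subst h15; decide
  by_cases h16 : k = "income_200k_plus"
  · subst h16; decide
  simp [pvKeyToBracket, pvKeysU, pvKeys50, pvKeys100, pvKeys150,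
    PySem.Dict.get?_mk_cons, Ne.symm h1, h1, Ne.symm h2, h2, Ne.symm h3, h3, Ne.symm h4, h4, Ne.symm h5, h5, Ne.symm h6, h6, Ne.symm h7, h7, Ne.symm h8, h8, Ne.symm h9, h9, Ne.symm h10, h10, Ne.symm h11, h11, Ne.symm h12, h12, Ne.symm h13, h13, Ne.symm h14, h14, Ne.symm h15, h15, Ne.symm h16, h16]
  rfl

lemma pvStepB_mkTot (a b c d : Int) (p : String × Int) :
    pvStepB (pvMkTot a b c d) p =
      pvMkTot (a + (if p.1 ∈ pvKeysU then p.2 else 0))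
              (b + (if p.1 ∈ pvKeys50 then p.2 else 0))
              (c + (if p.1 ∈ pvKeys100 then p.2 else 0))
              (d + (if p.1 ∈ pvKeys150 then p.2 else 0)) := by
  obtain ⟨k, v⟩ := p
  unfold pvStepB
  rw [pvLookup k]
  by_cases hU : k ∈ pvKeysU
  · have h50 : k ∉ pvKeys50 := by fin_cases hU <;> decide
    have h100 : k ∉ pvKeys100 := by fin_cases hU <;> decide
    have h150 : k ∉ pvKeys150 := by fin_cases hU <;> decide
    simp [hU, h50, h100, h150]; rfl
  · by_cases h50 : k ∈ pvKeys50
    · have h100 : k ∉ pvKeys100 := by fin_cases h50 <;> decide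
      have h150 : k ∉ pvKeys150 := by fin_cases h50 <;> decide
      simp [hU, h50, h100, h150]; rfl
    · by_cases h100 : k ∈ pvKeys100
      · have h150 : k ∉ pvKeys150 := by fin_cases h100 <;> decide
        simp [hU, h50, h100, h150]; rfl
      · by_cases h150 : k ∈ pvKeys150
        · simp [hU, h50, h100, h150]; rfl
        · simp [hU, h50, h100, h150]

lemma pvFoldB_inner (d : List (String × Int)) (a b c dd : Int) :
    d.foldl pvStepB (pvMkTot a b c dd) =
      pvMkTot (a + pvInd pvKeysU d) (b + pvInd pvKeys50 d)
              (c + pvInd pvKeys100 d) (dd + pvInd pvKeys150 d) := by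
  induction d generalizing a b c dd with
  | nil => simp [pvInd]
  | cons x xs ih =>
      simp only [List.foldl_cons, pvStepB_mkTot, ih, pvInd, List.map_cons, List.sum_cons]
      ring_nf

lemma pvFoldB (l : List (String × List (String × Int))) (a b c d : Int) :
    l.foldl (fun t p => p.2.foldl pvStepB t) (pvMkTot a b c d) =
      pvMkTot (a + (l.map (fun p => pvInd pvKeysU p.2)).sum)
              (b + (l.map (fun p => pvInd pvKeys50 p.2)).sum)
              (c + (l.map (fun p => pvInd pvKeys100 p.2)).sum)
              (d + (l.map (fun p => pvInd pvKeys150 p.2)).sum) := by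
  induction l generalizing a b c d with
  | nil => simp
  | cons x xs ih =>
      simp only [List.foldl_cons, pvFoldB_inner, ih, List.map_cons, List.sum_cons]
      ring_nf

-- a single-key indicator sum over a duplicate-free association list is the dict lookup
lemma pvSumIf0 (d : List (String × Int)) (k : String) (h : k ∉ d.map Prod.fst) :
    (d.map (fun p => if p.1 = k then p.2 else 0)).sum = 0 := by
  induction d with
  | nil => simp
  | cons x xs ih =>
      simp only [List.map_cons, List.mem_cons, not_or] at h
      simp only [List.map_cons, List.sum_cons, ih h.2, add_zero]
      exact if_neg (fun hx : x.1 = k => h.1 hx.symm)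

lemma pvSumIf1 (d : List (String × Int)) (k : String) (h : (d.map Prod.fst).Nodup) :
    (d.map (fun p => if p.1 = k then p.2 else 0)).sum = PySem.Dict.getD (PySem.Dict.mk d) k 0 := by
  induction d with
  | nil => rw [PySem.Dict.getD_eq_get?_getD]; rfl
  | cons x xs ih =>
      simp only [List.map_cons, List.nodup_cons] at h
      rw [PySem.Dict.getD_eq_get?_getD, PySem.Dict.get?_mk_cons]
      by_cases hx : x.1 = k
      · subst hx
        simp [pvSumIf0 xs x.1 h.1]
      · have hb : (x.1 == k) = false := by simp [hx]
        simp only [List.map_cons, List.sum_cons, if_neg hx, hb, Bool.false_eq_true,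
          if_false, zero_add]
        rw [ih h.2, PySem.Dict.getD_eq_get?_getD]

lemma pvBridge (ks : List String) (hks : ks.Nodup) (d : List (String × Int))
    (hd : (d.map Prod.fst).Nodup) : pvInd ks d = pvSum ks d := by
  induction ks with
  | nil => simp [pvInd, pvSum]
  | cons k0 ks' ih =>
      simp only [List.nodup_cons] at hks
      have hsplit : ∀ p : String × Int,
          (if p.1 ∈ k0 :: ks' then p.2 else 0) =
          (if p.1 = k0 then p.2 else 0) + (if p.1 ∈ ks' then p.2 else 0) := by
        intro p
        by_cases h0 : p.1 = k0
        · subst h0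
          simp [hks.1]
        · simp [h0, List.mem_cons]
      unfold pvInd pvSum
      simp only [List.map_cons, List.sum_cons]
      calc (d.map (fun p => if p.1 ∈ k0 :: ks' then p.2 else 0)).sum
          = (d.map (fun p => (if p.1 = k0 then p.2 else 0) + (if p.1 ∈ ks' then p.2 else 0))).sum := by
            exact congrArg List.sum (List.map_congr_left (fun p _ => hsplit p))
        _ = (d.map (fun p => if p.1 = k0 then p.2 else 0)).sum
              + (d.map (fun p => if p.1 ∈ ks' then p.2 else 0)).sum := by
            rw [PySem.List.sum_map_add_int]
        _ = PySem.Dict.getD (PySem.Dict.mk d) k0 0 + pvSum ks' d := by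
            rw [pvSumIf1 d k0 hd]
            have := ih hks.2
            unfold pvInd pvSum at this
            rw [this]
            rfl

-- ===== VERDICT (by name: the statement is the Claim_ definition above) =====
theorem calculate_income_distribution_py_spec : Claim_equal_calculate_income_distribution_py := by
  intro radius_data _ hpre
  show _ = _
  unfold calculate_income_distribution_py calculate_income_distribution_py_alt
  have hA := pvFoldA radius_data 0 0 0 0
  have hB := pvFoldB radius_data 0 0 0 0
  simp only [show PySem.Dict.mk [("brackets", PySem.Dict.mk
      [("under_50k", (0:Int)), ("50k_100k", 0), ("100k_150k", 0), ("150k_plus", 0)])] = pvMkDist 0 0 0 0 from rfl, hA]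
  simp only [show PySem.Dict.mk
      [("under_50k", (0:Int)), ("50k_100k", 0), ("100k_150k", 0), ("150k_plus", 0)] = pvMkTot 0 0 0 0 from rfl, hB]
  simp only [pvMkDist, pvMkTot, zero_add]
  have hmap : ∀ ks : List String, ks.Nodup →
      (radius_data.map (fun p => pvInd ks p.2)).sum = (radius_data.map (fun p => pvSum ks p.2)).sum := by
    intro ks hks
    exact congrArg List.sum (List.map_congr_left (fun p hp => pvBridge ks hks p.2 (hpre p hp)))
  rw [hmap pvKeysU (by decide), hmap pvKeys50 (by decide),
      hmap pvKeys100 (by decide), hmap pvKeys150 (by decide)]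
  rfl
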